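-- pv_equiv track=rewrite | github.com/altmattr/teaching | COMP3000 - Programming Languages/mdba/experiment.py | burley
-- ===== SOURCE A (Python) =====
-- def burley(history):
--     capacity = 3000
--     sum = 0
--     res = [0] * len(history)
--     summ = [0] * len(history)
--     for (i, h) in enumerate(history):
--       sum = sum + h
--       if (sum <= capacity):
--         res[i] = 0
--       else:
--         res[i] = sum - capacity
--         sum = capacity
--       summ[i] = sum
--     return res, summ
-- ===== SOURCE B (Python) =====
-- def burley(history):
--     capacity = 3000
--     # pass 1: clamping prefix sums
--     summ = []
--     prev = 0
--     for h in history: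
--         prev = min(capacity, prev + h)
--         summ.append(prev)
--     # pass 2: overflow derived from the difference of consecutive clamped sums
--     res = [p + h - s for p, (h, s) in zip([0] + summ, zip(history, summ))]
--     return res, summ
-- ===== Notes on version B (the rewrite author's own statement) =====
-- stated objective: alternative
-- what changed: Replaces A's single fused loop with inline overflow branching by a clamping-scan pass (summ[i] = min(cap, summ[i-1]+h)) followed by a separate difference pass deriving res[i] = summ[i-1] + h - summ[i].
import Mathlib
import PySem

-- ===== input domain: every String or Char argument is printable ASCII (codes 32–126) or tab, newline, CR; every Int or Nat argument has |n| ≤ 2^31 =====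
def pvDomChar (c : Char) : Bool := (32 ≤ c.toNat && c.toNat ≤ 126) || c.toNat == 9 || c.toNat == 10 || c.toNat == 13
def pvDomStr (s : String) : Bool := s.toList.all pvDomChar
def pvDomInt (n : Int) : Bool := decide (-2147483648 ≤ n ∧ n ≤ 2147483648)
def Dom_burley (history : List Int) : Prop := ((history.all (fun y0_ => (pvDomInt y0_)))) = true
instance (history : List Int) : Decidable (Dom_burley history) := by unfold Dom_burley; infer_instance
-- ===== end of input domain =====

-- B replaces A's single fused loop by a clamping-scan pass plus a difference pass deriving the overflow (alternative decomposition, same cost).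


-- ===== PORT A =====
-- A assigns res[i]/summ[i] with i running through the indices in order; this is ported as
-- appending to the list built so far (the assignments occur exactly in index order).
def burley (history : List Int) : List Int × List Int :=
  let capacity : Int := 3000
  let st := (PySem.List.enumerate history).foldl
    (fun (st : Int × List Int × List Int) (p : Int × Int) =>
      let sum := st.1 + p.2
      if sum ≤ capacity then (sum, st.2.1 ++ [(0 : Int)], st.2.2 ++ [sum])
      else (capacity, st.2.1 ++ [sum - capacity], st.2.2 ++ [capacity]))
    (0, [], [])
  (st.2.1, st.2.2)

-- ===== PORT B =====
def burley_alt (history : List Int) : List Int × List Int :=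
  let capacity : Int := 3000
  let summ := (history.foldl
    (fun (acc : Int × List Int) (h : Int) =>
      let prev := min capacity (acc.1 + h)
      (prev, acc.2 ++ [prev])) (0, [])).2
  let res := (List.zip ((0 : Int) :: summ) (List.zip history summ)).map
    (fun q => q.1 + q.2.1 - q.2.2)
  (res, summ)

-- ===== PRECONDITION & SPEC =====
def Spec_burley (history : List Int) (out : List Int × List Int) : Prop := out = burley_alt history
instance (history : List Int) (out : List Int × List Int) : Decidable (Spec_burley history out) := by unfold Spec_burley; infer_instance

-- ===== CLAIM (what is proved, stated in full; the proofs are below) =====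
def Claim_equal_burley : Prop := ∀ (history : List Int), Dom_burley history → Spec_burley history (burley history)

-- ===== LEMMAS AND PROOFS =====

theorem getLast_getD_cons : ∀ (l : List Int) (a d : Int),
    (a :: l).getLast?.getD d = l.getLast?.getD a
  | [], _, _ => by simp
  | b :: t, a, d => by
    rw [List.getLast?_cons_cons, getLast_getD_cons t b d, getLast_getD_cons t b a]

-- reference scans used to relate the two ports
def summF (s : Int) : List Int → List Int
  | [] => []
  | h :: t => min 3000 (s + h) :: summF (min 3000 (s + h)) t

def resF (s : Int) : List Int → List Int
  | [] => []
  | h :: t => (s + h - min 3000 (s + h)) :: resF (min 3000 (s + h)) t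

theorem burley_foldA (l : List Int) : ∀ (i s : Int) (r m : List Int),
    (PySem.List.enumerate l i).foldl
      (fun (st : Int × List Int × List Int) (p : Int × Int) =>
        let sum := st.1 + p.2
        if sum ≤ (3000 : Int) then (sum, st.2.1 ++ [(0 : Int)], st.2.2 ++ [sum])
        else ((3000 : Int), st.2.1 ++ [sum - 3000], st.2.2 ++ [(3000 : Int)]))
      (s, r, m)
    = ((summF s l).getLastD s, r ++ resF s l, m ++ summF s l) := by
  induction l with
  | nil => intro i s r m; simp [PySem.List.enumerate, summF, resF]
  | cons h t ih =>
    intro i s r m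
    rw [PySem.List.enumerate_cons]
    simp only [List.foldl_cons]
    have hstep :
        (let sum := s + h;
         if sum ≤ (3000 : Int) then (sum, r ++ [(0 : Int)], m ++ [sum])
         else ((3000 : Int), r ++ [sum - 3000], m ++ [(3000 : Int)]))
        = (min 3000 (s + h), r ++ [s + h - min 3000 (s + h)], m ++ [min 3000 (s + h)]) := by
      by_cases hc : s + h ≤ (3000 : Int)
      · simp [hc]
      · have : min (3000 : Int) (s + h) = 3000 := min_eq_left (le_of_lt (lt_of_not_ge hc))
        simp [hc, this]
    simp only [hstep]
    rw [ih (i + 1) (min 3000 (s + h)) (r ++ [s + h - min 3000 (s + h)]) (m ++ [min 3000 (s + h)])]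
    simp [summF, resF, getLast_getD_cons]

theorem burley_eq_ref (l : List Int) :
    burley l = (resF 0 l, summF 0 l) := by
  have h := burley_foldA l 0 0 [] []
  simp only [burley]
  rw [h]
  simp

theorem burley_foldB (l : List Int) : ∀ (s : Int) (acc : List Int),
    (l.foldl
      (fun (acc : Int × List Int) (h : Int) =>
        let prev := min (3000 : Int) (acc.1 + h)
        (prev, acc.2 ++ [prev])) (s, acc))
    = ((summF s l).getLastD s, acc ++ summF s l) := by
  induction l with
  | nil => intro s acc; simp [summF]
  | cons h t ih =>
    intro s acc
    simp only [List.foldl_cons]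
    rw [ih (min 3000 (s + h)) (acc ++ [min 3000 (s + h)])]
    simp [summF, getLast_getD_cons]

theorem burley_mapB (l : List Int) : ∀ (s : Int),
    (List.zip (s :: summF s l) (List.zip l (summF s l))).map
      (fun q => q.1 + q.2.1 - q.2.2) = resF s l := by
  induction l with
  | nil => intro s; simp [summF, resF]
  | cons h t ih =>
    intro s
    simp only [summF, resF, List.zip_cons_cons, List.map_cons]
    rw [ih (min 3000 (s + h))]

theorem burley_alt_eq_ref (l : List Int) :
    burley_alt l = (resF 0 l, summF 0 l) := by
  have h1 := burley_foldB l 0 []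
  have h2 := burley_mapB l 0
  simp only [burley_alt]
  rw [h1]
  simpa using h2

-- ===== VERDICT (by name: the statement is the Claim_ definition above) =====
theorem burley_spec : Claim_equal_burley := by
  intro history _
  unfold Spec_burley
  rw [burley_eq_ref, burley_alt_eq_ref]
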